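-- pv_equiv track=rewrite | github.com/Shreyassavanoor/leetcode_practice | ebay/cool_feature.py | coolFeature
-- ===== SOURCE A (Python) =====
-- def coolFeature(a, b, queries):
--     a_dict = {}
--     b_dict = {}
--     for i in range(len(a)):
--         if a[i] in a_dict:
--             a_dict[a[i]] += 1
--         else:
--             a_dict[a[i]] = 1
--
--     for i in range(len(b)):
--         if b[i] in b_dict:
--             b_dict[b[i]] += 1
--         else:
--             b_dict[b[i]] = 1
--
--     returnArr = []
--     for query in queries:
--         if query[0] == 0:
--             i = query[1]
--             x = query[2]
--             b_dict[b[i]] -= 1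
--             if x in b_dict:
--                 b_dict[x] += 1
--             else:
--                 b_dict[x] = 1
--
--         if query[0] == 1:
--             x = query[1]
--             counter = 0
--             for key in list(a_dict.keys()):
--                 if x - key in b_dict:
--                     counter += b_dict[x-key] * a_dict[key]
--
--             returnArr.append(counter)
--
--     return returnArr
-- ===== SOURCE B (Python) =====
-- def coolFeature(a, b, queries):
--     # Maintains a running convolution table c[s] = number of (signed) pair
--     # counts with a-value + b-value = s, updated per type-0 query, so each
--     # type-1 query is a single lookup instead of a scan over a's keys.
--     # Like A, b itself is never mutated (updates always read the original b[i]).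
--     a_cnt = {}
--     for v in a:
--         a_cnt[v] = a_cnt.get(v, 0) + 1
--     b_cnt = {}
--     for v in b:
--         b_cnt[v] = b_cnt.get(v, 0) + 1
--     c = {}
--     for k, av in a_cnt.items():
--         for k2, bv in b_cnt.items():
--             s = k + k2
--             c[s] = c.get(s, 0) + av * bv
--     out = []
--     for q in queries:
--         if q[0] == 0:
--             old = b[q[1]]
--             new = q[2]
--             for k, av in a_cnt.items():
--                 c[k + old] = c.get(k + old, 0) - av
--                 c[k + new] = c.get(k + new, 0) + av
--         elif q[0] == 1:
--             out.append(c.get(q[1], 0))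
--     return out
-- ===== Notes on version B (the rewrite author's own statement) =====
-- stated objective: alternative
-- what changed: B precomputes Counter(a), Counter(b) and a convolution table c[s] = sum_k a_cnt[k]*b_cnt[s-k]; a type-0 update shifts c by +-a_cnt[k] at the two affected sums and a type-1 query becomes a single dictionary lookup: it trades a one-off K_a*K_b table build (expensive when values are diverse) for O(1) type-1 queries, replacing A's per-query dot product over all of a's keys.
import Mathlib
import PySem

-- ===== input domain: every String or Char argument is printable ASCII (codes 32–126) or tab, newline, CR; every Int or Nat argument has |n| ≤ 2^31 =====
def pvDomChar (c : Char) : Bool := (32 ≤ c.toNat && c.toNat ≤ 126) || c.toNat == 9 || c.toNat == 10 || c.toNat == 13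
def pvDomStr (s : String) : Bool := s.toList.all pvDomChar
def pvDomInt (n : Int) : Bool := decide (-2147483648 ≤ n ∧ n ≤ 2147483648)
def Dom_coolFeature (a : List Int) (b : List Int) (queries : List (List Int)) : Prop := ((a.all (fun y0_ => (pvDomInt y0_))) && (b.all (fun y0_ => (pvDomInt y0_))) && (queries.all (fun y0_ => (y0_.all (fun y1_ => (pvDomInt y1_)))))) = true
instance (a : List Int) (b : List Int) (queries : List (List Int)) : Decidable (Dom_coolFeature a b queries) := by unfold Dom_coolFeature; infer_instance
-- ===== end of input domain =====

-- B replaces A's per-query dot product over a's keys by a running convolution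
-- table, so each type-1 query is a single lookup (return values only; like A,
-- B never mutates its arguments).

-- ===== PORT A =====

-- `if v in d: d[v] += 1 else: d[v] = 1` over a list (A builds a_dict and b_dict this way)
def countA (xs : List Int) : PySem.Dict Int Int :=
  xs.foldl (fun d v => if d.contains v then d.insert v (d.getD v 0 + 1) else d.insert v 1)
    PySem.Dict.empty

-- one iteration of A's query loop; state = (b_dict, returnArr)
def stepA (ad : PySem.Dict Int Int) (b : List Int)
    (st : PySem.Dict Int Int × List Int) (q : List Int) :
    PySem.Dict Int Int × List Int :=
  let st1 :=
    if PySem.List.pyGet? q 0 = some 0 then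
      let i := PySem.List.pyGetD q 1 0
      let x := PySem.List.pyGetD q 2 0
      let old := PySem.List.pyGetD b i 0
      -- b_dict[b[i]] -= 1 (exact: under Pre_ the key b[i] is always present)
      let bd1 := st.1.insert old (st.1.getD old 0 - 1)
      let bd2 := if bd1.contains x then bd1.insert x (bd1.getD x 0 + 1) else bd1.insert x 1
      (bd2, st.2)
    else st
  if PySem.List.pyGet? q 0 = some 1 then
    let x := PySem.List.pyGetD q 1 0
    let counter := ad.keys.foldl
      (fun c k => if st1.1.contains (x - k) then c + st1.1.getD (x - k) 0 * ad.getD k 0 else c) 0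
    (st1.1, st1.2 ++ [counter])
  else st1

def coolFeature (a : List Int) (b : List Int) (queries : List (List Int)) : List Int :=
  (queries.foldl (stepA (countA a) b) (countA b, [])).2

-- ===== PORT B =====

-- `d[v] = d.get(v, 0) + 1` over a list
def countB (xs : List Int) : PySem.Dict Int Int :=
  xs.foldl (fun d v => d.insert v (d.getD v 0 + 1)) PySem.Dict.empty

-- initial convolution table: c[k+k2] += av * bv over all pairs of items
def convInit (ad bd : PySem.Dict Int Int) : PySem.Dict Int Int :=
  ad.items.foldl (fun c p =>
    bd.items.foldl (fun c p2 =>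
      c.insert (p.1 + p2.1) (c.getD (p.1 + p2.1) 0 + p.2 * p2.2)) c)
    PySem.Dict.empty

-- one iteration of B's query loop; state = (c, out)
def stepB (ad : PySem.Dict Int Int) (b : List Int)
    (st : PySem.Dict Int Int × List Int) (q : List Int) :
    PySem.Dict Int Int × List Int :=
  if PySem.List.pyGet? q 0 = some 0 then
    let old := PySem.List.pyGetD b (PySem.List.pyGetD q 1 0) 0
    let nw := PySem.List.pyGetD q 2 0
    let c' := ad.items.foldl (fun c p =>
      let c1 := c.insert (p.1 + old) (c.getD (p.1 + old) 0 - p.2)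
      c1.insert (p.1 + nw) (c1.getD (p.1 + nw) 0 + p.2)) st.1
    (c', st.2)
  else if PySem.List.pyGet? q 0 = some 1 then
    (st.1, st.2 ++ [st.1.getD (PySem.List.pyGetD q 1 0) 0])
  else st

def coolFeature_alt (a : List Int) (b : List Int) (queries : List (List Int)) : List Int :=
  let ad := countB a
  (queries.foldl (stepB ad b) (convInit ad (countB b), [])).2

-- ===== PRECONDITION & SPEC =====
-- Pre_ = exactly the inputs where Python A returns normally: every query is
-- non-empty, a type-0 query has ≥ 3 entries and an in-range (possibly negative)
-- index into b, a type-1 query has ≥ 2 entries (otherwise A raises IndexError).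
def Pre_coolFeature (a : List Int) (b : List Int) (queries : List (List Int)) : Prop :=
  ∀ q ∈ queries, q ≠ [] ∧
    (PySem.List.pyGet? q 0 = some 0 →
      3 ≤ q.length ∧ PySem.Raise.InRange b.length (PySem.List.pyGetD q 1 0)) ∧
    (PySem.List.pyGet? q 0 = some 1 → 2 ≤ q.length)
instance (a : List Int) (b : List Int) (queries : List (List Int)) : Decidable (Pre_coolFeature a b queries) := by unfold Pre_coolFeature; infer_instance

def pvWitness_coolFeature : List Int × List Int × List (List Int) := ([1], [2], [[1, 3]])

def Spec_coolFeature (a : List Int) (b : List Int) (queries : List (List Int)) (out : List Int) : Prop := out = coolFeature_alt a b queries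
instance (a : List Int) (b : List Int) (queries : List (List Int)) (out : List Int) : Decidable (Spec_coolFeature a b queries out) := by unfold Spec_coolFeature; infer_instance

-- ===== CLAIM (what is proved, stated in full; the proofs are below) =====
def Claim_equal_coolFeature : Prop := ∀ (a : List Int) (b : List Int) (queries : List (List Int)), Dom_coolFeature a b queries → Pre_coolFeature a b queries → Spec_coolFeature a b queries (coolFeature a b queries)

-- ===== LEMMAS AND PROOFS =====

-- the abstract quantity both programs track: convSum a bd s = Σ_{(k,av) ∈ Counter(a).items} bd[s-k] * av
def convSum (a : List Int) (bd : PySem.Dict Int Int) (s : Int) : Int :=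
  ((PySem.Dict.counter a).items.map (fun p => bd.getD (s - p.1) 0 * p.2)).sum

-- both count builders are Counter(xs)
theorem countA_eq_counter (xs : List Int) : countA xs = PySem.Dict.counter xs := by
  unfold countA
  rw [← PySem.Dict.foldl_insert_getD_add_one_eq_counter]
  apply PySem.List.foldl_congr_mem
  intro d v _
  by_cases h : d.contains v = true
  · simp [h]
  · simp only [Bool.not_eq_true] at h
    simp [h, PySem.Dict.getD_of_not_contains d 0 h]

theorem countB_eq_counter (xs : List Int) : countB xs = PySem.Dict.counter xs :=
  PySem.Dict.foldl_insert_getD_add_one_eq_counter xs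

-- indicator sum over a list of distinct keys
theorem sum_map_ite_nodup (ks : List Int) (t : Int) (f : Int → Int) (h : ks.Nodup) :
    (ks.map (fun k => if k = t then f k else 0)).sum = if t ∈ ks then f t else 0 := by
  induction ks with
  | nil => simp
  | cons k ks ih =>
    simp only [List.nodup_cons] at h
    by_cases hk : k = t
    · subst hk
      simp [h.1, ih h.2]
    · have : ¬ t = k := fun e => hk e.symm
      simp [hk, this, ih h.2]

-- indicator sum over Counter(a).items picks out the multiplicity
theorem sum_items_ite (a : List Int) (t : Int) :
    ((PySem.Dict.counter a).items.map (fun p => if p.1 = t then p.2 else 0)).sum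
      = (a.count t : Int) := by
  rw [PySem.Dict.items_counter, List.map_map]
  have := sum_map_ite_nodup (PySem.Set.ofList a) t (fun k => (a.count k : Int)) (PySem.Set.nodup_ofList a)
  simp only [Function.comp_def]
  rw [this]
  by_cases hm : t ∈ PySem.Set.ofList a
  · simp [hm]
  · have : a.count t = 0 := by
      rw [List.count_eq_zero]
      simpa [PySem.Set.mem_ofList] using hm
    simp [hm, this]

-- indicator sum over Counter(a).items at a shifted key
theorem sum_items_shift (a : List Int) (d s : Int) :
    ((PySem.Dict.counter a).items.map (fun p => if p.1 + d = s then p.2 else 0)).sum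
      = (a.count (s - d) : Int) := by
  have h : ∀ p ∈ (PySem.Dict.counter a).items,
      (if p.1 + d = s then p.2 else 0)
        = (fun p : Int × Int => if p.1 = s - d then p.2 else 0) p := by
    intro p _
    have c1 : (p.1 + d = s) ↔ (p.1 = s - d) := by omega
    simp only [c1]
  rw [List.map_congr_left h, sum_items_ite]

-- A's per-query counter equals convSum
theorem counterA_eq_convSum (a : List Int) (bd : PySem.Dict Int Int) (x : Int) :
    (PySem.Dict.counter a).keys.foldl
      (fun c k => if bd.contains (x - k) then c + bd.getD (x - k) 0 * (PySem.Dict.counter a).getD k 0 else c) 0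
      = convSum a bd x := by
  have hkeys : (PySem.Dict.counter a).keys = (PySem.Dict.counter a).items.map Prod.fst := rfl
  rw [hkeys, List.foldl_map]
  rw [PySem.List.foldl_congr_mem _ _
      (fun c (p : Int × Int) => c + bd.getD (x - p.1) 0 * p.2) 0 ?_]
  · rw [PySem.List.foldl_add]
    simp [convSum]
  · intro acc p hp
    have hv : (PySem.Dict.counter a).getD p.1 0 = p.2 :=
      PySem.Dict.getD_of_mem_items _ (by simpa using hp) (PySem.Dict.nodup_keys_counter a) 0
    by_cases hc : bd.contains (x - p.1) = true
    · simp [hc, hv]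
    · simp only [Bool.not_eq_true] at hc
      simp [hc, PySem.Dict.getD_of_not_contains bd 0 hc]

-- pointwise reading of one insert that shifts a single key
theorem getD_insert_shift (c : PySem.Dict Int Int) (key w s : Int) :
    (c.insert key (c.getD key 0 + w)).getD s 0
      = c.getD s 0 + (if key = s then w else 0) := by
  rw [PySem.Dict.getD_insert]
  by_cases h : s = key
  · subst h; simp
  · rw [if_neg h, if_neg (fun e => h e.symm)]; ring

-- pointwise reading of one iteration of B's update loop
theorem getD_step2 (c : PySem.Dict Int Int) (k av old nw s : Int) :
    ((c.insert (k + old) (c.getD (k + old) 0 - av)).insert (k + nw)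
        ((c.insert (k + old) (c.getD (k + old) 0 - av)).getD (k + nw) 0 + av)).getD s 0
      = c.getD s 0 + (if k + nw = s then av else 0) - (if k + old = s then av else 0) := by
  have h1 : ∀ t, (c.insert (k + old) (c.getD (k + old) 0 - av)).getD t 0
      = c.getD t 0 - (if k + old = t then av else 0) := by
    intro t
    have : c.getD (k + old) 0 - av = c.getD (k + old) 0 + (-av) := by ring
    rw [this, getD_insert_shift]
    split_ifs <;> ring
  rw [getD_insert_shift, h1]
  ring

-- pointwise effect of B's double-insert update loop
theorem getD_updateLoop (L : List (Int × Int)) (c : PySem.Dict Int Int) (old nw s : Int) :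
    (L.foldl (fun c p =>
        let c1 := c.insert (p.1 + old) (c.getD (p.1 + old) 0 - p.2)
        c1.insert (p.1 + nw) (c1.getD (p.1 + nw) 0 + p.2)) c).getD s 0
      = c.getD s 0
        + (L.map (fun p => if p.1 + nw = s then p.2 else 0)).sum
        - (L.map (fun p => if p.1 + old = s then p.2 else 0)).sum := by
  induction L generalizing c with
  | nil => simp
  | cons p L ih =>
    simp only [List.foldl_cons, List.map_cons, List.sum_cons, ih, getD_step2]
    ring

-- pointwise effect of A's b_dict update
theorem getD_bdUpdate (bd : PySem.Dict Int Int) (old nw t : Int) :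
    ((if (bd.insert old (bd.getD old 0 - 1)).contains nw
        then (bd.insert old (bd.getD old 0 - 1)).insert nw
              ((bd.insert old (bd.getD old 0 - 1)).getD nw 0 + 1)
        else (bd.insert old (bd.getD old 0 - 1)).insert nw 1).getD t 0)
      = bd.getD t 0 + (if nw = t then 1 else 0) - (if old = t then 1 else 0) := by
  set bd1 := bd.insert old (bd.getD old 0 - 1) with hbd1
  have h1 : ∀ u, bd1.getD u 0 = bd.getD u 0 - (if old = u then 1 else 0) := by
    intro u
    have e : bd.getD old 0 - 1 = bd.getD old 0 + (-1) := by ring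
    rw [hbd1, e, getD_insert_shift]
    split_ifs <;> ring
  by_cases hc : bd1.contains nw = true
  · rw [if_pos hc, getD_insert_shift, h1]
    ring
  · simp only [Bool.not_eq_true] at hc
    have h0 : bd1.getD nw 0 = 0 := PySem.Dict.getD_of_not_contains bd1 0 hc
    rw [if_neg (by simp [hc]),
      show bd1.insert nw 1 = bd1.insert nw (bd1.getD nw 0 + 1) by rw [h0]; norm_num,
      getD_insert_shift, h1]
    ring

-- sum of a pointwise difference (difference form of PySem.List.sum_map_add_int)
theorem sum_map_sub_int (xs : List (Int × Int)) (f g : Int × Int → Int) :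
    (xs.map (fun x => f x - g x)).sum = (xs.map f).sum - (xs.map g).sum := by
  induction xs with
  | nil => simp
  | cons x xs ih => simp only [List.map_cons, List.sum_cons, ih]; ring

-- convSum is pointwise linear under A's update
theorem convSum_update (a : List Int) (bd : PySem.Dict Int Int) (old nw s : Int) :
    convSum a
      (if (bd.insert old (bd.getD old 0 - 1)).contains nw
        then (bd.insert old (bd.getD old 0 - 1)).insert nw
              ((bd.insert old (bd.getD old 0 - 1)).getD nw 0 + 1)
        else (bd.insert old (bd.getD old 0 - 1)).insert nw 1) s
      = convSum a bd s + (a.count (s - nw) : Int) - (a.count (s - old) : Int) := by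
  unfold convSum
  have hterm : ∀ p : Int × Int,
      (if (bd.insert old (bd.getD old 0 - 1)).contains nw
        then (bd.insert old (bd.getD old 0 - 1)).insert nw
              ((bd.insert old (bd.getD old 0 - 1)).getD nw 0 + 1)
        else (bd.insert old (bd.getD old 0 - 1)).insert nw 1).getD (s - p.1) 0 * p.2
      = (fun q : Int × Int => bd.getD (s - q.1) 0 * q.2) p
        + ((fun q : Int × Int => (if q.1 = s - nw then q.2 else 0)
            - (if q.1 = s - old then q.2 else 0)) p) := by
    intro p
    rw [getD_bdUpdate]
    have c1 : (nw = s - p.1) ↔ (p.1 = s - nw) := by omega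
    have c2 : (old = s - p.1) ↔ (p.1 = s - old) := by omega
    simp only [c1, c2]
    split_ifs <;> ring
  rw [List.map_congr_left (fun p _ => hterm p), PySem.List.sum_map_add_int,
    sum_map_sub_int, sum_items_ite, sum_items_ite]
  ring

-- inner pair loop of convInit
theorem getD_convInner (L : List (Int × Int)) (c : PySem.Dict Int Int) (k av s : Int) :
    (L.foldl (fun c p2 => c.insert (k + p2.1) (c.getD (k + p2.1) 0 + av * p2.2)) c).getD s 0
      = c.getD s 0 + (L.map (fun p2 => if k + p2.1 = s then av * p2.2 else 0)).sum := by
  induction L generalizing c with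
  | nil => simp
  | cons p L ih =>
    simp only [List.foldl_cons, List.map_cons, List.sum_cons, ih, getD_insert_shift]
    ring

-- outer loop of convInit, over an arbitrary item list
theorem getD_convOuter (L M : List (Int × Int)) (c : PySem.Dict Int Int) (s : Int) :
    (L.foldl (fun c p =>
        M.foldl (fun c p2 => c.insert (p.1 + p2.1) (c.getD (p.1 + p2.1) 0 + p.2 * p2.2)) c) c).getD s 0
      = c.getD s 0
        + (L.map (fun p => (M.map (fun p2 => if p.1 + p2.1 = s then p.2 * p2.2 else 0)).sum)).sum := by
  induction L generalizing c with
  | nil => simp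
  | cons p L ih =>
    simp only [List.foldl_cons, List.map_cons, List.sum_cons, ih, getD_convInner]
    ring

-- the initial table realises convSum of the initial b_dict
theorem getD_convInit (a bxs : List Int) (s : Int) :
    (convInit (PySem.Dict.counter a) (PySem.Dict.counter bxs)).getD s 0
      = convSum a (PySem.Dict.counter bxs) s := by
  unfold convInit
  rw [getD_convOuter, PySem.Dict.getD_empty]
  have hterm : ∀ p : Int × Int,
      ((PySem.Dict.counter bxs).items.map
        (fun p2 => if p.1 + p2.1 = s then p.2 * p2.2 else 0)).sum
      = (PySem.Dict.counter bxs).getD (s - p.1) 0 * p.2 := by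
    intro p
    have h1 : ∀ p2 : Int × Int, (if p.1 + p2.1 = s then p.2 * p2.2 else 0)
        = p.2 * (if p2.1 = s - p.1 then p2.2 else 0) := by
      intro p2
      have c1 : (p.1 + p2.1 = s) ↔ (p2.1 = s - p.1) := by omega
      simp only [c1]
      split_ifs <;> ring
    rw [List.map_congr_left (fun p2 _ => h1 p2), List.sum_map_mul_left, sum_items_ite,
      PySem.Dict.getD_counter]
    ring
  rw [List.map_congr_left (fun p _ => hterm p)]
  unfold convSum
  ring

-- main loop invariant: if c realises convSum of bd, both loops emit the same output
theorem loop_eq (a b : List Int) (qs : List (List Int)) (bd c : PySem.Dict Int Int)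
    (out : List Int) (hinv : ∀ s, c.getD s 0 = convSum a bd s) :
    (qs.foldl (stepA (PySem.Dict.counter a) b) (bd, out)).2
      = (qs.foldl (stepB (PySem.Dict.counter a) b) (c, out)).2 := by
  induction qs generalizing bd c out with
  | nil => simp only [List.foldl_nil]
  | cons q qs ih =>
    simp only [List.foldl_cons]
    by_cases h0 : PySem.List.pyGet? q 0 = some 0
    · simp only [stepA, stepB, h0]
      apply ih
      intro s
      rw [getD_updateLoop, hinv s, sum_items_shift, sum_items_shift, convSum_update]
    · by_cases h1 : PySem.List.pyGet? q 0 = some 1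
      · simp only [stepA, stepB, h1]
        rw [counterA_eq_convSum, hinv]
        exact ih bd c _ hinv
      · simp only [stepA, stepB, if_neg h0, if_neg h1]
        exact ih bd c out hinv

-- ===== VERDICT (by name: the statement is the Claim_ definition above) =====
theorem coolFeature_spec : Claim_equal_coolFeature := by
  intro a b queries _ _
  unfold Spec_coolFeature coolFeature coolFeature_alt
  rw [countA_eq_counter, countA_eq_counter, countB_eq_counter, countB_eq_counter]
  exact loop_eq a b queries _ _ [] (fun s => getD_convInit a b s)
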